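-- pv_equiv track=rewrite | github.com/SB-Han/codility | class/03_time_complexity/TapeEquilibrium/solution2.py | solution
-- ===== SOURCE A (Python) =====
-- def solution(A):
--     suffix = sum(A[1:])
--     prefix = A[0]
--     current_min = abs(prefix - suffix)
--     for each in A[1:len(A)-1]:
--         prefix += each
--         suffix -= each
--         current = abs(prefix - suffix)
--         if current < current_min:
--             current_min = current
--     return current_min
-- ===== SOURCE B (Python) =====
-- def solution(A):
--     # Build the table of prefix sums once, then take the minimum of
--     # |2*p - total| over all split points (prefixes[:-1]).
--     prefixes = []
--     p = 0
--     for x in A: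
--         p += x
--         prefixes.append(p)
--     total = prefixes[-1]
--     if len(A) == 1:
--         return abs(total)
--     return min(abs(2 * q - total) for q in prefixes[:-1])
-- ===== Notes on version B (the rewrite author's own statement) =====
-- stated objective: alternative
-- what changed: Replaces A's single loop with two incrementally-updated running sums (prefix up, suffix down) by a build-then-scan decomposition: build the prefix-sum table once, read the total from its last entry, and take min of |2*p - total| over the split points with the min builtin.
import Mathlib
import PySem

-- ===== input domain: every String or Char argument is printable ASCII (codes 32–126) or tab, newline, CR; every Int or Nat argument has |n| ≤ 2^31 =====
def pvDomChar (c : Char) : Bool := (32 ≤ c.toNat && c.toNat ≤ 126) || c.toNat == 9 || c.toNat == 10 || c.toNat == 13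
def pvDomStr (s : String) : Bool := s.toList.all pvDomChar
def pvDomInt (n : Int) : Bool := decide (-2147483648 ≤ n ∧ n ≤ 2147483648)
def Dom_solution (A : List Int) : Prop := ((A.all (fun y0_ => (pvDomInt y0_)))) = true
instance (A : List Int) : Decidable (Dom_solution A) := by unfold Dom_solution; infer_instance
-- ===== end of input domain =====

-- B replaces A's single loop over two running sums by build-prefix-table then min-scan; alternative decomposition, same cost.


-- ===== PORT A =====
def solution (A : List Int) : Int :=
  match PySem.List.pyGet? A 0 with
  | none => 0  -- A[0] raises IndexError on the empty list; excluded by Pre_solution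
  | some a0 =>
    let suffix0 : Int := (PySem.List.slice A (some 1) none).sum
    let st :=
      (PySem.List.slice A (some 1) (some ((A.length : Int) - 1))).foldl
        (fun (st : Int × Int × Int) each =>
          let pfxv := st.1 + each
          let sufv := st.2.1 - each
          let current := |pfxv - sufv|
          (pfxv, sufv, if current < st.2.2 then current else st.2.2))
        (a0, suffix0, |a0 - suffix0|)
    st.2.2

-- ===== PORT B =====
def solution_alt (A : List Int) : Int :=
  let prefixes :=
    (A.foldl (fun (st : List Int × Int) x => (st.1 ++ [st.2 + x], st.2 + x)) ([], 0)).1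
  match PySem.List.pyGet? prefixes (-1) with
  | none => 0  -- prefixes[-1] raises IndexError on the empty list; excluded by Pre_solution
  | some total =>
    if A.length = 1 then |total|
    else
      match PySem.List.min?
          ((PySem.List.slice prefixes none (some (-1))).map (fun q => |2 * q - total|))
          (fun y => y) with
      | none => 0  -- min() on empty: unreachable when A.length ≥ 2
      | some m => m

-- ===== PRECONDITION & SPEC =====
-- Pre_ excludes only the empty list, on which A raises IndexError (A[0]).
def Pre_solution (A : List Int) : Prop := A ≠ []
instance (A : List Int) : Decidable (Pre_solution A) := by unfold Pre_solution; infer_instance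
def pvWitness_solution : List Int := ([3, 1, 2, 4, 3])
def Spec_solution (A : List Int) (out : Int) : Prop := out = solution_alt A
instance (A : List Int) (out : Int) : Decidable (Spec_solution A out) := by unfold Spec_solution; infer_instance

-- ===== CLAIM (what is proved, stated in full; the proofs are below) =====
def Claim_equal_solution : Prop := ∀ (A : List Int), Dom_solution A → Pre_solution A → Spec_solution A (solution A)

-- ===== LEMMAS AND PROOFS =====

/-- Running prefix sums of `xs` starting from accumulator `p`. -/
def pfx : List Int → Int → List Int
  | [], _ => []
  | x :: xs, p => (p + x) :: pfx xs (p + x)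

lemma pfx_ne_nil (xs : List Int) (p : Int) (h : xs ≠ []) : pfx xs p ≠ [] := by
  cases xs with
  | nil => exact absurd rfl h
  | cons x xs => simp [pfx]

lemma pfx_foldl (xs : List Int) (acc : List Int) (p : Int) :
    (xs.foldl (fun (st : List Int × Int) x => (st.1 ++ [st.2 + x], st.2 + x)) (acc, p)).1
      = acc ++ pfx xs p := by
  induction xs generalizing acc p with
  | nil => simp [pfx]
  | cons x xs ih => simp [pfx, List.foldl_cons, ih]

lemma pfx_dropLast (xs : List Int) (p : Int) :
    pfx xs.dropLast p = (pfx xs p).dropLast := by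
  induction xs generalizing p with
  | nil => simp [pfx]
  | cons x xs ih =>
    cases xs with
    | nil => simp [pfx]
    | cons y ys =>
      have h := ih (p + x)
      simp only [pfx] at h
      simp only [List.dropLast_cons₂, pfx]
      exact congrArg _ h

lemma pfx_getLast? (xs : List Int) (p : Int) (h : xs ≠ []) :
    (pfx xs p).getLast? = some (p + xs.sum) := by
  induction xs generalizing p with
  | nil => exact absurd rfl h
  | cons x xs ih =>
    cases xs with
    | nil => simp [pfx]
    | cons y ys =>
      rw [show pfx (x :: y :: ys) p = (p + x) :: (p + x + y) :: pfx ys (p + x + y) from rfl,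
          List.getLast?_cons_cons,
          show (p + x + y) :: pfx ys (p + x + y) = pfx (y :: ys) (p + x) from rfl,
          ih _ (by simp)]
      simp
      ring

/-- Candidates produced by A's loop from state `(p, s)`. -/
def candsA : List Int → Int → Int → List Int
  | [], _, _ => []
  | x :: xs, p, s => |(p + x) - (s - x)| :: candsA xs (p + x) (s - x)

lemma loopA_eq_foldl_cands (xs : List Int) (p s m : Int) :
    (xs.foldl
        (fun (st : Int × Int × Int) each =>
          let pfxv := st.1 + each
          let sufv := st.2.1 - each
          let current := |pfxv - sufv|
          (pfxv, sufv, if current < st.2.2 then current else st.2.2))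
        (p, s, m)).2.2
      = (candsA xs p s).foldl (fun acc c => if c < acc then c else acc) m := by
  induction xs generalizing p s m with
  | nil => simp [candsA]
  | cons x xs ih => simp [candsA, List.foldl_cons, ih]

lemma candsA_eq_map (xs : List Int) (p s T : Int) (h : p + s = T) :
    candsA xs p s = (pfx xs p).map (fun q => |2 * q - T|) := by
  induction xs generalizing p s with
  | nil => simp [candsA, pfx]
  | cons x xs ih =>
    simp only [candsA, pfx, List.map_cons]
    congr 1
    · congr 1; omega
    · exact ih (p + x) (s - x) (by omega)

lemma foldl_if_eq_foldl_min (l : List Int) (m : Int) :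
    l.foldl (fun acc c => if c < acc then c else acc) m = l.foldl min m := by
  induction l generalizing m with
  | nil => rfl
  | cons c l ih =>
    simp only [List.foldl_cons, ih]
    congr 1
    rw [min_def]
    split_ifs <;> omega

-- ===== VERDICT (by name: the statement is the Claim_ definition above) =====
theorem solution_spec : Claim_equal_solution := by
  intro A _ hA
  unfold Spec_solution solution solution_alt
  cases A with
  | nil => exact absurd rfl hA
  | cons a0 rest =>
    simp only [PySem.List.pyGet?_zero_cons]
    have hpfx : ((a0 :: rest).foldl
        (fun (st : List Int × Int) x => (st.1 ++ [st.2 + x], st.2 + x)) ([], 0)).1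
        = pfx (a0 :: rest) 0 := by
      simpa using pfx_foldl (a0 :: rest) [] 0
    rw [hpfx, PySem.List.pyGet?_neg_one, pfx_getLast? _ _ (by simp)]
    have hsum : (0 : Int) + (a0 :: rest).sum = a0 + rest.sum := by simp
    rw [hsum]
    have hsuf : (PySem.List.slice (a0 :: rest) (some 1) none).sum = rest.sum := by
      rw [PySem.List.slice_from_one]; rfl
    have hslice : PySem.List.slice (a0 :: rest) (some 1) (some (((a0 :: rest).length : Int) - 1))
        = rest.dropLast := by
      have h1 : (((a0 :: rest).length : Int) - 1) = (rest.length : Int) := by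
        push_cast [List.length_cons]; ring
      rw [h1, show ((1 : Int)) = ((1 : Nat) : Int) from rfl, PySem.List.slice_natCast]
      simp [List.dropLast_eq_take]
    rw [hsuf, hslice, loopA_eq_foldl_cands,
        candsA_eq_map rest.dropLast a0 rest.sum (a0 + rest.sum) rfl,
        foldl_if_eq_foldl_min]
    dsimp only
    cases rest with
    | nil =>
      simp [pfx]
    | cons y ys =>
      have hlen : ¬ (a0 :: y :: ys).length = 1 := by simp
      rw [if_neg hlen]
      have hp : pfx (a0 :: y :: ys) 0 = a0 :: pfx (y :: ys) a0 := by
        simp [pfx]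
      rw [hp, PySem.List.slice_to_neg_one]
      have hdl : (a0 :: pfx (y :: ys) a0).dropLast = a0 :: (pfx (y :: ys) a0).dropLast := by
        cases hq : pfx (y :: ys) a0 with
        | nil => exact absurd hq (pfx_ne_nil _ _ (by simp))
        | cons b l => simp
      rw [hdl, ← pfx_dropLast, List.map_cons, PySem.List.min?_id_cons]
      have ha0 : |2 * a0 - (a0 + (y :: ys).sum)| = |a0 - (y :: ys).sum| := by
        congr 1; ring
      rw [ha0]
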